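-- pv_equiv track=rewrite | github.com/gitlexia/haiku-generator | haiku_generator.py | pick_theme
-- ===== SOURCE A (Python) =====
-- from typing import Dict, List, Optional, Set, Tuple
--
-- SETTING_KEYWORDS = {
--     "urban": {"city", "street", "streets", "train", "station", "neon", "traffic", "bus", "sirens", "subway", "tube"},
--     "nature": {"rain", "wind", "river", "forest", "moon", "stars", "snow", "sun", "sky", "water", "beach", "ocean"},
--     "indoors": {"room", "window", "lamp", "kitchen", "coffee", "tea", "screen", "phone", "keys", "book", "books"},
--     "animal": {"dog", "cat", "horse", "bird", "fox", "owl", "moth", "bee", "spider", "fish", "penguin", "mouse", "rat"},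
--     "food": {"sandwich", "ham", "bread", "soup", "pizza", "pasta", "coffee", "tea", "salt", "sugar", "honey"},
--     "night": {"night", "midnight", "moon", "stars", "neon", "tonight", "dusk", "dawn", "twilight"},
-- }
--
-- def pick_theme(tags: Set[str], keywords: List[str]) -> str:
--     for theme in ("food", "animal", "urban", "indoors", "nature"):
--         if theme in tags:
--             return theme
--     for k in keywords:
--         for theme, keys in SETTING_KEYWORDS.items():
--             if k in keys:
--                 return "nature" if theme == "night" else theme
--     return "neutral"
-- ===== SOURCE B (Python) =====
-- from typing import Dict, List, Optional, Set, Tuple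
--
-- SETTING_KEYWORDS = {
--     "urban": {"city", "street", "streets", "train", "station", "neon", "traffic", "bus", "sirens", "subway", "tube"},
--     "nature": {"rain", "wind", "river", "forest", "moon", "stars", "snow", "sun", "sky", "water", "beach", "ocean"},
--     "indoors": {"room", "window", "lamp", "kitchen", "coffee", "tea", "screen", "phone", "keys", "book", "books"},
--     "animal": {"dog", "cat", "horse", "bird", "fox", "owl", "moth", "bee", "spider", "fish", "penguin", "mouse", "rat"},
--     "food": {"sandwich", "ham", "bread", "soup", "pizza", "pasta", "coffee", "tea", "salt", "sugar", "honey"},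
--     "night": {"night", "midnight", "moon", "stars", "neon", "tonight", "dusk", "dawn", "twilight"},
-- }
--
--
-- def pick_theme(tags: Set[str], keywords: List[str]) -> str:
--     for theme in ("food", "animal", "urban", "indoors", "nature"):
--         if theme in tags:
--             return theme
--     # Inverted traversal: one pass per THEME finding its first matching keyword
--     # position, then an argmin over (keyword position, theme position).
--     best = None  # (first_index_in_keywords, theme_position, resolved_theme)
--     for j, (theme, keys) in enumerate(SETTING_KEYWORDS.items()):
--         for i, k in enumerate(keywords):
--             if k in keys:
--                 if best is None or (i, j) < (best[0], best[1]):
--                     best = (i, j, "nature" if theme == "night" else theme)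
--                 break
--     return best[2] if best is not None else "neutral"
-- ===== Notes on version B (the rewrite author's own statement) =====
-- stated objective: alternative
-- what changed: B inverts the loop nesting of the keyword phase: instead of scanning every theme's keyword set for each keyword in order, it does one pass per theme finding that theme's first matching keyword position, then returns the theme with the lexicographically least (keyword position, theme position); correct because A's answer is exactly that argmin.
import Mathlib
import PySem

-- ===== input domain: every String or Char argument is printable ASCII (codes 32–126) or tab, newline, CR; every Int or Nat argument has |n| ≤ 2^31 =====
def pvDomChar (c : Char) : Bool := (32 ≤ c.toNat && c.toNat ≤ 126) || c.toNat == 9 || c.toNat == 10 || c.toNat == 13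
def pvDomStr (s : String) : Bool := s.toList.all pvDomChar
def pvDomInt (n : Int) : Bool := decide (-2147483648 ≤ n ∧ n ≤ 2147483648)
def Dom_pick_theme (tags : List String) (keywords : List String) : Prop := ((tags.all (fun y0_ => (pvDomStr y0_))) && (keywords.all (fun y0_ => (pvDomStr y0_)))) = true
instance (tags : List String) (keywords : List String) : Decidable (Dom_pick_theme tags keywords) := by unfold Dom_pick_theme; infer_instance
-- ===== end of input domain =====

-- B inverts the keyword phase's loop nesting: one pass per theme finding its first
-- matching keyword position, then an argmin over (keyword position, theme position)
-- (alternative decomposition; same asymptotic cost).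

-- shared module constant SETTING_KEYWORDS (sets ported as lists of their distinct elements)
def settingKeywords : List (String × List String) :=
  [("urban", ["city", "street", "streets", "train", "station", "neon", "traffic", "bus", "sirens", "subway", "tube"]),
   ("nature", ["rain", "wind", "river", "forest", "moon", "stars", "snow", "sun", "sky", "water", "beach", "ocean"]),
   ("indoors", ["room", "window", "lamp", "kitchen", "coffee", "tea", "screen", "phone", "keys", "book", "books"]),
   ("animal", ["dog", "cat", "horse", "bird", "fox", "owl", "moth", "bee", "spider", "fish", "penguin", "mouse", "rat"]),
   ("food", ["sandwich", "ham", "bread", "soup", "pizza", "pasta", "coffee", "tea", "salt", "sugar", "honey"]),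
   ("night", ["night", "midnight", "moon", "stars", "neon", "tonight", "dusk", "dawn", "twilight"])]

-- ===== PORT A =====
-- first loop: 'for theme in (...): if theme in tags: return theme'
def pickA_tagLoop (tags : List String) : List String → Option String
  | [] => none
  | t :: rest => if tags.contains t then some t else pickA_tagLoop tags rest

-- inner loop: 'for theme, keys in SETTING_KEYWORDS.items(): if k in keys: return ...'
def pickA_scan (k : String) : List (String × List String) → Option String
  | [] => none
  | (theme, keys) :: rest =>
      if keys.contains k then some (if theme == "night" then "nature" else theme)
      else pickA_scan k rest

-- outer loop: 'for k in keywords: ...'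
def pickA_kwLoop : List String → Option String
  | [] => none
  | k :: rest =>
      match pickA_scan k settingKeywords with
      | some r => some r
      | none => pickA_kwLoop rest

def pick_theme (tags : List String) (keywords : List String) : String :=
  match pickA_tagLoop tags ["food", "animal", "urban", "indoors", "nature"] with
  | some t => t
  | none =>
    match pickA_kwLoop keywords with
    | some r => r
    | none => "neutral"

-- ===== PORT B =====
-- same first loop as A's (B keeps it)
def pickB_tagLoop (tags : List String) : List String → Option String
  | [] => none
  | t :: rest => if tags.contains t then some t else pickB_tagLoop tags rest

-- inner loop: 'for i, k in enumerate(keywords): if k in keys: ...; break'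
def pickB_firstHit (keys : List String) : Nat → List String → Option Nat
  | _, [] => none
  | i, k :: rest => if keys.contains k then some i else pickB_firstHit keys (i + 1) rest

def pickB_resolve (t : String) : String := if t == "night" then "nature" else t

-- outer loop: 'for j, (theme, keys) in enumerate(SETTING_KEYWORDS.items()): ...',
-- state best : Option (first keyword index, theme position, resolved theme)
-- loop body: 'if k in keys: if best is None or (i, j) < (best[0], best[1]): best = ...; break'
def pickB_step (ks : List String) (j : Nat) (t : String) (keys : List String) (best : Option (Nat × Nat × String)) : Option (Nat × Nat × String) :=
  match pickB_firstHit keys 0 ks with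
  | none => best
  | some i =>
    match best with
    | none => some (i, j, pickB_resolve t)
    | some b => if i < b.1 ∨ (i = b.1 ∧ j < b.2.1) then some (i, j, pickB_resolve t) else best

def pickB_loop (ks : List String) : Nat → Option (Nat × Nat × String) → List (String × List String) → Option (Nat × Nat × String)
  | _, best, [] => best
  | j, best, (t, keys) :: rest => pickB_loop ks (j + 1) (pickB_step ks j t keys best) rest

def pick_theme_alt (tags : List String) (keywords : List String) : String :=
  match pickB_tagLoop tags ["food", "animal", "urban", "indoors", "nature"] with
  | some t => t
  | none =>
    match pickB_loop keywords 0 none settingKeywords with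
    | some b => b.2.2
    | none => "neutral"

-- ===== PRECONDITION & SPEC =====
def Spec_pick_theme (tags : List String) (keywords : List String) (out : String) : Prop := out = pick_theme_alt tags keywords
instance (tags : List String) (keywords : List String) (out : String) : Decidable (Spec_pick_theme tags keywords out) := by unfold Spec_pick_theme; infer_instance

-- ===== CLAIM (what is proved, stated in full; the proofs are below) =====
def Claim_equal_pick_theme : Prop := ∀ (tags : List String) (keywords : List String), Dom_pick_theme tags keywords → Spec_pick_theme tags keywords (pick_theme tags keywords)

-- ===== LEMMAS AND PROOFS =====

def pvInc (c : Nat × String) : Nat × String := (c.1 + 1, c.2)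

-- earliest minimum (by first component) of a candidate list
def pvMinBy1 : List (Nat × String) → Option (Nat × String)
  | [] => none
  | c :: rest =>
    match pvMinBy1 rest with
    | none => some c
    | some b => if c.1 ≤ b.1 then some c else some b

-- per-theme candidates: (first matching keyword index, resolved theme)
def pvCands (ks : List String) (L : List (String × List String)) : List (Nat × String) :=
  L.filterMap (fun p => (pickB_firstHit p.2 0 ks).map (fun i => (i, pickB_resolve p.1)))

def pvCombine : Option (Nat × String) → Option (Nat × String) → Option (Nat × String)
  | none, c => c
  | some b, none => some b
  | some b, some c => if c.1 < b.1 then some c else some b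

def pvStrip : Option (Nat × Nat × String) → Option (Nat × String)
  | none => none
  | some x => some (x.1, x.2.2)

theorem pickB_tagLoop_eq (tags : List String) (l : List String) :
    pickB_tagLoop tags l = pickA_tagLoop tags l := by
  induction l with
  | nil => rfl
  | cons t rest ih => simp only [pickB_tagLoop, pickA_tagLoop, ih]

theorem firstHit_shift (keys : List String) (ks : List String) (n : Nat) :
    pickB_firstHit keys n ks = (pickB_firstHit keys 0 ks).map (fun i => i + n) := by
  induction ks generalizing n with
  | nil => rfl
  | cons k rest ih =>
    by_cases h : k ∈ keys
    · simp [pickB_firstHit, h]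
    · simp only [pickB_firstHit]
      rw [if_neg (by simpa using h), if_neg (by simpa using h), ih (n + 1), ih 1]
      cases pickB_firstHit keys 0 rest <;> simp <;> omega

theorem minBy1_cons (c : Nat × String) (l : List (Nat × String)) :
    pvMinBy1 (c :: l) = pvCombine (some c) (pvMinBy1 l) := by
  simp only [pvMinBy1]
  cases pvMinBy1 l with
  | none => rfl
  | some b => simp only [pvCombine]; split_ifs with h1 h2 h2 <;> first | rfl | omega

theorem combine_assoc (a b c : Option (Nat × String)) :
    pvCombine (pvCombine a b) c = pvCombine a (pvCombine b c) := by
  cases a with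
  | none => rfl
  | some x =>
    cases b with
    | none => rfl
    | some y =>
      cases c with
      | none => simp only [pvCombine]; split_ifs <;> rfl
      | some z =>
        simp only [pvCombine]
        split_ifs <;> simp only [pvCombine] <;> split_ifs <;> first | rfl | omega

theorem cands_nil (L : List (String × List String)) : pvCands [] L = [] := by
  induction L with
  | nil => rfl
  | cons p rest ih => simp only [pvCands, List.filterMap_cons] at ih ⊢; simp [pickB_firstHit, ih]

theorem minBy1_cands_cons (ks : List String) (p : String × List String) (L : List (String × List String)) :
    pvMinBy1 (pvCands ks (p :: L)) =
      pvCombine ((pickB_firstHit p.2 0 ks).map (fun i => (i, pickB_resolve p.1))) (pvMinBy1 (pvCands ks L)) := by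
  simp only [pvCands, List.filterMap_cons]
  cases h : (pickB_firstHit p.2 0 ks).map (fun i => (i, pickB_resolve p.1)) with
  | none => cases pvMinBy1 (L.filterMap _) <;> rfl
  | some c => exact minBy1_cons c _

theorem pickB_step_strip (ks : List String) (j : Nat) (t : String) (keys : List String)
    (best : Option (Nat × Nat × String)) (hinv : ∀ b, best = some b → b.2.1 < j) :
    pvStrip (pickB_step ks j t keys best) =
      pvCombine (pvStrip best) ((pickB_firstHit keys 0 ks).map (fun i => (i, pickB_resolve t))) := by
  unfold pickB_step
  cases hfh : pickB_firstHit keys 0 ks with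
  | none => cases best <;> rfl
  | some i =>
    cases hb : best with
    | none => rfl
    | some b =>
      have hj : b.2.1 < j := hinv b hb
      simp only [Option.map_some, pvStrip, pvCombine]
      by_cases hlt : i < b.1
      · rw [if_pos (Or.inl hlt), if_pos hlt]
      · rw [if_neg (by omega), if_neg (by omega)]

theorem pickB_step_inv (ks : List String) (j : Nat) (t : String) (keys : List String)
    (best : Option (Nat × Nat × String)) (hinv : ∀ b, best = some b → b.2.1 < j) :
    ∀ b, pickB_step ks j t keys best = some b → b.2.1 < j + 1 := by
  intro b hb
  unfold pickB_step at hb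
  cases hfh : pickB_firstHit keys 0 ks with
  | none =>
    rw [hfh] at hb
    exact Nat.lt_succ_of_lt (hinv b hb)
  | some i =>
    rw [hfh] at hb
    cases hbest : best with
    | none =>
      rw [hbest] at hb
      dsimp only at hb
      cases hb
      exact Nat.lt_succ_self j
    | some b0 =>
      rw [hbest] at hb
      dsimp only at hb
      split_ifs at hb
      · cases hb; exact Nat.lt_succ_self j
      · cases hb; exact Nat.lt_succ_of_lt (hinv _ hbest)

-- B's left fold computes the earliest argmin
theorem pickB_loop_char (ks : List String) (L : List (String × List String)) :
    ∀ (j : Nat) (best : Option (Nat × Nat × String)), (∀ b, best = some b → b.2.1 < j) →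
    pvStrip (pickB_loop ks j best L) = pvCombine (pvStrip best) (pvMinBy1 (pvCands ks L)) := by
  induction L with
  | nil =>
    intro j best _
    cases best <;> rfl
  | cons p rest ih =>
    intro j best hinv
    obtain ⟨t, keys⟩ := p
    simp only [pickB_loop]
    rw [ih (j + 1) _ (pickB_step_inv ks j t keys best hinv),
        pickB_step_strip ks j t keys best hinv,
        minBy1_cands_cons, combine_assoc]

-- A's keyword loop over `k :: rest` versus candidates: reduce to `rest`
theorem cands_cons_kw (k : String) (rest : List String) (L : List (String × List String)) :
    pvMinBy1 (pvCands (k :: rest) L) =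
      match pickA_scan k L with
      | some r => some (0, r)
      | none => (pvMinBy1 (pvCands rest L)).map pvInc := by
  induction L with
  | nil => rfl
  | cons p L' ih =>
    obtain ⟨t, keys⟩ := p
    rw [minBy1_cands_cons, minBy1_cands_cons]
    simp only [pickA_scan]
    by_cases hk : keys.contains k = true
    · have hfh : pickB_firstHit keys 0 (k :: rest) = some 0 := by
        simp only [pickB_firstHit]
        rw [if_pos hk]
      rw [hfh, if_pos hk]
      have hres : pickB_resolve t = (if t == "night" then "nature" else t) := rfl
      rw [← hres]
      cases pvMinBy1 (pvCands (k :: rest) L') with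
      | none => rfl
      | some b => simp [pvCombine]
    · have hfh : pickB_firstHit keys 0 (k :: rest) = (pickB_firstHit keys 0 rest).map (fun i => i + 1) := by
        simp only [pickB_firstHit]
        rw [if_neg hk]
        exact firstHit_shift keys rest 1
      rw [hfh, if_neg hk, ih]
      cases hs : pickA_scan k L' with
      | some r =>
        cases hfr : pickB_firstHit keys 0 rest with
        | none => rfl
        | some i => simp [pvCombine]
      | none =>
        cases hfr : pickB_firstHit keys 0 rest with
        | none => rfl
        | some i =>
          simp only [Option.map_some]
          cases hm : pvMinBy1 (pvCands rest L') with
          | none => simp [pvCombine, pvInc]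
          | some b =>
            simp only [Option.map_some, pvCombine, pvInc]
            split_ifs with h1 h2 h2 <;> first | rfl | omega

theorem kwLoop_eq_minBy1 (ks : List String) :
    pickA_kwLoop ks = (pvMinBy1 (pvCands ks settingKeywords)).map Prod.snd := by
  induction ks with
  | nil => rw [cands_nil]; rfl
  | cons k rest ih =>
    simp only [pickA_kwLoop, cands_cons_kw k rest settingKeywords, ih]
    cases pickA_scan k settingKeywords with
    | some r => rfl
    | none =>
      cases pvMinBy1 (pvCands rest settingKeywords) <;> simp [pvInc]

-- ===== VERDICT (by name: the statement is the Claim_ definition above) =====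
theorem pick_theme_spec : Claim_equal_pick_theme := by
  intro tags keywords _
  unfold Spec_pick_theme pick_theme pick_theme_alt
  rw [pickB_tagLoop_eq]
  cases pickA_tagLoop tags ["food", "animal", "urban", "indoors", "nature"] with
  | some t => rfl
  | none =>
    simp only
    rw [kwLoop_eq_minBy1]
    have h := pickB_loop_char keywords settingKeywords 0 none (by intro b hb; cases hb)
    simp only [pvStrip, pvCombine] at h
    cases hl : pickB_loop keywords 0 none settingKeywords with
    | none => rw [hl] at h; rw [← h]; rfl
    | some b => rw [hl] at h; rw [← h]; rfl
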